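-- pv_equiv track=rewrite | github.com/danielewhughes/dissertation | evaluators/singability/rhyme_analyser.py | check_perfect_match
-- ===== SOURCE A (Python) =====
-- def check_perfect_match(ref, test):
--     index_map_ref = {}
--     for index, char in enumerate(ref):
--         if index_map_ref.get(char):
--             index_map_ref[char].append(index)
--         else:
--             index_map_ref[char] = [index]
--     index_map_test = {}
--     for x, ch in enumerate(test):
--         if index_map_test.get(ch):
--             index_map_test[ch].append(x)
--         else:
--             index_map_test[ch] = [x]
--
--     for indices in index_map_ref.values():
--         if len(indices) > 1 and ref[indices[0]].isupper():
--             if indices not in index_map_test.values():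
--                 return False
--             if ref[indices[0]].isupper() and test[indices[0]].islower():
--                 return False
--             if ref[indices[0]].islower() and test[indices[0]].isupper():
--                 return False
--
--     return True
-- ===== SOURCE B (Python) =====
-- def check_perfect_match(ref, test):
--     groups = {}
--     for i, ch in enumerate(ref):
--         groups.setdefault(ch, []).append(i)
--     for ch, idxs in groups.items():
--         if len(idxs) > 1 and ch.isupper():
--             if idxs[-1] >= len(test):
--                 return False
--             c = test[idxs[0]]
--             if any(test[i] != c for i in idxs) or test.count(c) != len(idxs):
--                 return False
--             if c.islower():
--                 return False
--     return True
-- ===== Notes on version B (the rewrite author's own statement) =====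
-- stated objective: simpler
-- what changed: B builds only the ref char-to-indices table and validates each repeated uppercase group by scanning test directly (index-range guard, all-characters-equal scan, count comparison) instead of building a second index table for test and testing list membership among its values.
import Mathlib
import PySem

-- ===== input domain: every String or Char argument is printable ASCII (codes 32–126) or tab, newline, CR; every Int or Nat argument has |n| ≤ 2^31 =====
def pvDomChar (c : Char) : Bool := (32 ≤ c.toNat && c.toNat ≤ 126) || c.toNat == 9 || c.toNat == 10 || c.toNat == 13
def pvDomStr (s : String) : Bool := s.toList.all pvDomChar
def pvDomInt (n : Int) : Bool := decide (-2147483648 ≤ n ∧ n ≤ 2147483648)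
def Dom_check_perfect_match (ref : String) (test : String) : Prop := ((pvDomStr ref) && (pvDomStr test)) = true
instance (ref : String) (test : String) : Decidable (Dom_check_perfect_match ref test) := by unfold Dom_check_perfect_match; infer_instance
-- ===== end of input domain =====

-- B replaces A's second index table over `test` and the list-membership test by a direct
-- per-group scan-and-count of `test`; same return value everywhere (objective: simpler).

-- ===== PORT A =====
-- the body of both of A's dict-building loops: `if m.get(ch): m[ch].append(i) else: m[ch] = [i]`
def pvStepA (d : PySem.Dict Char (List Int)) (p : Int × Char) : PySem.Dict Char (List Int) :=
  if ((d.get? p.2).getD []).isEmpty then d.insert p.2 [p.1]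
  else d.modify p.2 [] (fun l => l ++ [p.1])

def check_perfect_match (ref : String) (test : String) : Bool :=
  let r := ref.toList
  let t := test.toList
  let mref := (PySem.List.enumerate r 0).foldl pvStepA PySem.Dict.empty
  let mtest := (PySem.List.enumerate t 0).foldl pvStepA PySem.Dict.empty
  -- the for-loop over mref.values() with its early `return False`s, as an `all`
  mref.values.all (fun indices =>
    if indices.length > 1 && PySem.Chars.isupper (PySem.List.pyGetD r (PySem.List.pyGetD indices 0 0) ' ') then
      if !(mtest.values.contains indices) then false
      else
        let rc := PySem.List.pyGetD r (PySem.List.pyGetD indices 0 0) ' '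
        let tc := PySem.List.pyGetD t (PySem.List.pyGetD indices 0 0) ' '
        if PySem.Chars.isupper rc && PySem.Chars.islower tc then false
        else if PySem.Chars.islower rc && PySem.Chars.isupper tc then false
        else true
    else true)

-- ===== PORT B =====
-- B's single grouping loop: `groups.setdefault(ch, []).append(i)`
def pvStepB (d : PySem.Dict Char (List Int)) (p : Int × Char) : PySem.Dict Char (List Int) :=
  (d.setdefault p.2 []).modify p.2 [] (fun l => l ++ [p.1])

def check_perfect_match_alt (ref : String) (test : String) : Bool :=
  let t := test.toList
  let groups := (PySem.List.enumerate ref.toList 0).foldl pvStepB PySem.Dict.empty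
  groups.items.all (fun p =>
    let ch := p.1
    let idxs := p.2
    if idxs.length > 1 && PySem.Chars.isupper ch then
      if (t.length : Int) ≤ PySem.List.pyGetD idxs (-1) 0 then false
      else
        let c := PySem.List.pyGetD t (PySem.List.pyGetD idxs 0 0) ' '
        if (idxs.any fun i => PySem.List.pyGetD t i ' ' ≠ c) || (t.count c ≠ idxs.length) then false
        else if PySem.Chars.islower c then false
        else true
    else true)

-- ===== PRECONDITION & SPEC =====
def Spec_check_perfect_match (ref : String) (test : String) (out : Bool) : Prop := out = check_perfect_match_alt ref test
instance (ref : String) (test : String) (out : Bool) : Decidable (Spec_check_perfect_match ref test out) := by unfold Spec_check_perfect_match; infer_instance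

-- ===== CLAIM (what is proved, stated in full; the proofs are below) =====
def Claim_equal_check_perfect_match : Prop := ∀ (ref : String) (test : String), Dom_check_perfect_match ref test → Spec_check_perfect_match ref test (check_perfect_match ref test)

-- ===== LEMMAS AND PROOFS =====

-- the common extensional value of both loop bodies
def pvStep (d : PySem.Dict Char (List Int)) (p : Int × Char) : PySem.Dict Char (List Int) :=
  d.modify p.2 [] (fun l => l ++ [p.1])

-- the ascending list of indices at which character c occurs in t
def pvOcc (t : List Char) (c : Char) : List Int :=
  ((PySem.List.enumerate t 0).filter (fun p => p.2 == c)).map (fun p => p.1)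

theorem pvStepA_eq : pvStepA = pvStep := by
  funext d p
  unfold pvStepA pvStep
  rcases hg : d.get? p.2 with _ | l
  · simp [PySem.Dict.modify, PySem.Dict.getD_eq_get?_getD, hg]
  · cases l with
    | nil => simp [PySem.Dict.modify, PySem.Dict.getD_eq_get?_getD, hg]
    | cons a l' => simp [PySem.Dict.modify, PySem.Dict.getD_eq_get?_getD, hg]

theorem pvStepB_eq : pvStepB = pvStep := by
  funext d p
  unfold pvStepB pvStep
  by_cases hc : d.contains p.2
  · rw [PySem.Dict.setdefault_of_contains d ([] : List Int) hc]
  · have hc' : d.contains p.2 = false := by simpa using hc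
    rw [PySem.Dict.setdefault_of_not_contains d ([] : List Int) hc']
    simp only [PySem.Dict.modify]
    rw [PySem.Dict.getD_insert_self d p.2 ([] : List Int) ([] : List Int),
        PySem.Dict.insert_insert_self,
        PySem.Dict.getD_of_not_contains d ([] : List Int) hc']

theorem pv_getD_build (t : List Char) (c : Char) :
    ((PySem.List.enumerate t 0).foldl pvStep PySem.Dict.empty).getD c [] = pvOcc t c := by
  have h : (PySem.List.enumerate t 0).foldl pvStep PySem.Dict.empty
      = ((PySem.List.enumerate t 0).map Prod.swap).foldl
          (fun d p => d.modify p.1 [] (fun l => l ++ [p.2])) PySem.Dict.empty := by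
    rw [List.foldl_map]; rfl
  rw [h, PySem.Dict.getD_foldl_modify_append]
  simp [pvOcc, List.filter_map, List.map_map, Function.comp_def, PySem.Dict.getD_empty]

theorem pv_keys_build (t : List Char) :
    ((PySem.List.enumerate t 0).foldl pvStep PySem.Dict.empty).keys = PySem.Set.ofList t := by
  have h := PySem.Dict.keys_foldl_modify_key (PySem.List.enumerate t 0)
      (fun p : Int × Char => p.2) ([] : List Int) (fun _ x => fun l => l ++ [x.1]) PySem.Dict.empty
  rw [PySem.List.map_snd_enumerate] at h
  exact h.trans (PySem.Set.update_empty t)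

theorem pv_nodup_keys_build (t : List Char) :
    ((PySem.List.enumerate t 0).foldl pvStep PySem.Dict.empty).keys.Nodup := by
  have h := PySem.Dict.nodup_keys_foldl_modify_key (PySem.List.enumerate t 0)
      (fun p : Int × Char => p.2) ([] : List Int) (fun _ x => fun l => l ++ [x.1]) PySem.Dict.empty
      (by simp [PySem.Dict.keys, PySem.Dict.empty])
  simpa [pvStep] using h

theorem pv_values_build (t : List Char) :
    ((PySem.List.enumerate t 0).foldl pvStep PySem.Dict.empty).values
      = (PySem.Set.ofList t).map (fun c => pvOcc t c) := by
  rw [PySem.Dict.values_eq_map_keys _ (pv_nodup_keys_build t) ([] : List Int), pv_keys_build]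
  exact List.map_congr_left (fun c _ => pv_getD_build t c)

theorem pv_items_build (t : List Char) :
    ((PySem.List.enumerate t 0).foldl pvStep PySem.Dict.empty).items
      = (PySem.Set.ofList t).map (fun c => (c, pvOcc t c)) := by
  rw [PySem.Dict.items_eq_map_keys _ (pv_nodup_keys_build t) ([] : List Int), pv_keys_build]
  exact List.map_congr_left (fun c _ => by rw [pv_getD_build t c])

theorem pv_occ_spec (t : List Char) (c : Char) (i : Int) (h : i ∈ pvOcc t c) :
    0 ≤ i ∧ i < (t.length : Int) ∧ PySem.List.pyGetD t i ' ' = c := by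
  unfold pvOcc at h
  simp only [List.mem_map, List.mem_filter] at h
  obtain ⟨p, ⟨hpe, hpc⟩, rfl⟩ := h
  rw [PySem.List.mem_enumerate_iff] at hpe
  obtain ⟨k, hk, rfl⟩ := hpe
  simp only [beq_iff_eq] at hpc
  refine ⟨by simp, by simpa using hk, ?_⟩
  rw [PySem.List.pyGetD_eq_getElem t ' ' (by simp) (by simpa using hk)]
  simpa using hpc

theorem pv_mem_occ (t : List Char) (c : Char) (i : Int) (h0 : 0 ≤ i) (h1 : i < (t.length : Int))
    (h2 : PySem.List.pyGetD t i ' ' = c) : i ∈ pvOcc t c := by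
  unfold pvOcc
  simp only [List.mem_map, List.mem_filter]
  have hk : i.toNat < t.length := by omega
  refine ⟨(i, t[i.toNat]), ⟨?_, ?_⟩, rfl⟩
  · rw [PySem.List.mem_enumerate_iff]
    exact ⟨i.toNat, hk, by rw [Prod.mk.injEq]; exact ⟨by omega, rfl⟩⟩
  · rw [PySem.List.pyGetD_eq_getElem t ' ' h0 h1] at h2
    simpa using h2

theorem pv_occ_pairwise (t : List Char) (c : Char) : (pvOcc t c).Pairwise (· < ·) := by
  unfold pvOcc
  exact ((PySem.List.pairwise_lt_enumerate t 0).filter _).map _ (fun _ _ h => h)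

theorem pv_countP_enum (t : List Char) (s : Int) (c : Char) :
    (PySem.List.enumerate t s).countP (fun p => p.2 == c) = t.count c := by
  induction t generalizing s with
  | nil => simp [PySem.List.enumerate_nil]
  | cons x xs ih => simp [PySem.List.enumerate_cons, List.countP_cons, List.count_cons, ih]

theorem pv_occ_length (t : List Char) (c : Char) : (pvOcc t c).length = t.count c := by
  unfold pvOcc
  rw [List.length_map, ← List.countP_eq_length_filter]
  exact pv_countP_enum t 0 c

theorem pv_le_getLast {l : List Int} (hp : l.Pairwise (· < ·)) (h : l ≠ []) :
    ∀ x ∈ l, x ≤ l.getLast h := by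
  intro x hx
  obtain ⟨i, hi, rfl⟩ := List.getElem_of_mem hx
  rw [List.getLast_eq_getElem]
  rcases Nat.lt_or_ge i (l.length - 1) with hlt | hge
  · exact le_of_lt ((List.pairwise_iff_getElem.mp hp) i (l.length - 1) hi (by omega) hlt)
  · have hieq : i = l.length - 1 := by omega
    subst hieq
    exact le_of_eq rfl

theorem pv_all_congr {α : Type} (l : List α) (p q : α → Bool) (h : ∀ x ∈ l, p x = q x) :
    l.all p = l.all q := by
  induction l with
  | nil => rfl
  | cons a l ih =>
    simp only [List.all_cons, h a (by simp)]
    rw [ih (fun x hx => h x (by simp [hx]))]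

theorem pv_not_islower {c : Char} (h : PySem.Chars.isupper c = true) :
    PySem.Chars.islower c = false := by
  simp only [PySem.Chars.isupper, Bool.and_eq_true, decide_eq_true_eq, Char.le_def] at h
  simp only [PySem.Chars.islower, Bool.and_eq_false_iff, decide_eq_false_iff_not, Char.le_def]
  left
  intro hc
  have h1 := h.1
  have h2 := h.2
  revert h1 h2 hc
  simp [UInt32.le_iff_toNat_le]
  omega

-- ===== VERDICT (by name: the statement is the Claim_ definition above) =====
theorem check_perfect_match_spec : Claim_equal_check_perfect_match := by
  intro ref test _
  unfold Spec_check_perfect_match check_perfect_match check_perfect_match_alt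
  dsimp only
  rw [pvStepA_eq, pvStepB_eq]
  rw [pv_values_build, pv_values_build, pv_items_build]
  rw [List.all_map, List.all_map]
  apply pv_all_congr
  intro c _
  simp only [Function.comp_def]
  set r := ref.toList with hr
  set t := test.toList with ht
  by_cases hlen : 1 < (pvOcc r c).length
  case neg => simp [hlen]
  have hne : pvOcc r c ≠ [] := by
    intro hnil; rw [hnil] at hlen; simp at hlen
  have hi0 : PySem.List.pyGetD (pvOcc r c) 0 0 ∈ pvOcc r c := by
    rcases hx : pvOcc r c with _ | ⟨a, l⟩
    · exact absurd hx hne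
    · simp [PySem.List.pyGetD_zero_cons]
  have hr0 : PySem.List.pyGetD r (PySem.List.pyGetD (pvOcc r c) 0 0) ' ' = c :=
    (pv_occ_spec r c _ hi0).2.2
  rw [hr0]
  by_cases hup : PySem.Chars.isupper c = true
  case neg => simp [hup]
  have hlo := pv_not_islower hup
  have hlastmem : PySem.List.pyGetD (pvOcc r c) (-1) 0 ∈ pvOcc r c := by
    rw [PySem.List.pyGetD_neg_one (pvOcc r c) 0 hne]
    exact List.getLast_mem hne
  by_cases hmem : pvOcc r c ∈ (PySem.Set.ofList t).map (fun c' => pvOcc t c')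
  · obtain ⟨c', _, hocc⟩ := List.mem_map.mp hmem
    have hforall : ∀ i ∈ pvOcc r c, 0 ≤ i ∧ i < (t.length : Int) ∧ PySem.List.pyGetD t i ' ' = c' := by
      intro i hi
      exact pv_occ_spec t c' i (by rw [hocc]; exact hi)
    have htc : PySem.List.pyGetD t (PySem.List.pyGetD (pvOcc r c) 0 0) ' ' = c' :=
      (hforall _ hi0).2.2
    have hg1 : ¬ ((t.length : Int) ≤ PySem.List.pyGetD (pvOcc r c) (-1) 0) := by
      have := (hforall _ hlastmem).2.1
      omega
    have hcnt : List.count c' t = (pvOcc r c).length := by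
      rw [← hocc]; exact (pv_occ_length t c').symm
    simp [hlen, hup, hlo, hmem, htc, hg1, hcnt]
    intro _ x hx
    exact (hforall x hx).2.2
  · by_cases hg1 : (t.length : Int) ≤ PySem.List.pyGetD (pvOcc r c) (-1) 0
    · simp [hlen, hup, hmem, hg1]
    · set tc := PySem.List.pyGetD t (PySem.List.pyGetD (pvOcc r c) 0 0) ' ' with htcdef
      simp [hlen, hup, hmem, hg1]
      intro hall hcnt'
      exfalso
      apply hmem
      have hsub : pvOcc r c ⊆ pvOcc t tc := by
        intro i hi
        have h0 : 0 ≤ i := (pv_occ_spec r c i hi).1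
        have hle : i ≤ (pvOcc r c).getLast hne :=
          pv_le_getLast (pv_occ_pairwise r c) hne i hi
        have hlast : (pvOcc r c).getLast hne < (t.length : Int) := by
          rw [PySem.List.pyGetD_neg_one (pvOcc r c) 0 hne] at hg1
          omega
        exact pv_mem_occ t tc i h0 (by omega) (hall i hi)
      have hnodup : (pvOcc r c).Nodup :=
        (pv_occ_pairwise r c).imp (fun h => ne_of_lt h)
      have hlen2 : (pvOcc t tc).length ≤ (pvOcc r c).length := by
        rw [pv_occ_length t tc, hcnt']
      have hperm : (pvOcc r c).Perm (pvOcc t tc) :=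
        (List.subperm_of_subset hnodup hsub).perm_of_length_le hlen2
      have heq : pvOcc r c = pvOcc t tc :=
        PySem.List.eq_of_perm_of_pairwise_le_of_injective (fun x => x) (fun _ _ hx => hx)
          hperm ((pv_occ_pairwise r c).imp (fun hx => le_of_lt hx))
          ((pv_occ_pairwise t tc).imp (fun hx => le_of_lt hx))
      have htcmem : tc ∈ t := by
        rw [← List.count_pos_iff]
        omega
      exact List.mem_map.mpr ⟨tc, by rw [PySem.Set.mem_ofList]; exact htcmem, heq.symm⟩
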